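-- pv_equiv track=rewrite | github.com/raeez/chiral-bar-cobar | compute/lib/bar_cohomology_dimensions.py | _w3_states_raw
-- ===== SOURCE A (Python) =====
-- from typing import Dict, List, Optional, Tuple, Any
--
-- def _w3_states_raw(h: int) -> List[Tuple[Tuple[str, int], ...]]:
--     """Raw state tuples for W_3 at weight h."""
--     def _gen(remaining, max_pair):
--         if remaining == 0:
--             yield ()
--             return
--         for level in range(min(remaining, max_pair[1] if max_pair else remaining), 1, -1):
--             for mtype in (['W', 'L'] if level >= 3 else ['L'] if level >= 2 else []):
--                 if max_pair and (mtype, level) > max_pair: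
--                     continue
--                 pair = (mtype, level)
--                 for rest in _gen(remaining - level, pair):
--                     yield (pair,) + rest
--     return list(_gen(h, None))
-- ===== SOURCE B (Python) =====
-- from typing import List, Tuple
--
-- def _w3_states_raw(h: int) -> List[Tuple[Tuple[str, int], ...]]:
--     """Raw state tuples for W_3 at weight h, via memoized DP on (remaining, cap)
--     states: each state's suffix list is computed once and shared."""
--     memo = {}
--     def solve(r, cap):
--         key = (r, cap)
--         if key in memo:
--             return memo[key]
--         if r == 0:
--             res = [()]
--         else:
--             res = []
--             top = r if cap is None else min(r, cap[1])
--             for level in range(top, 1, -1):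
--                 for m in (('W', 'L') if level >= 3 else ('L',)):
--                     pair = (m, level)
--                     if cap is not None and pair > cap:
--                         continue
--                     res.extend((pair,) + rest for rest in solve(r - level, pair))
--         memo[key] = res
--         return res
--     return solve(h, None)
-- ===== Notes on version B (the rewrite author's own statement) =====
-- stated objective: faster
-- what changed: A's naive recursive generator re-enumerates the same (remaining, max_pair) suffix state once per prefix reaching it; B memoizes each state in a dict keyed on (remaining, cap), computing every state once as a dynamic program over the DAG of states and sharing its suffix list, with identical output order.
import Mathlib
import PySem

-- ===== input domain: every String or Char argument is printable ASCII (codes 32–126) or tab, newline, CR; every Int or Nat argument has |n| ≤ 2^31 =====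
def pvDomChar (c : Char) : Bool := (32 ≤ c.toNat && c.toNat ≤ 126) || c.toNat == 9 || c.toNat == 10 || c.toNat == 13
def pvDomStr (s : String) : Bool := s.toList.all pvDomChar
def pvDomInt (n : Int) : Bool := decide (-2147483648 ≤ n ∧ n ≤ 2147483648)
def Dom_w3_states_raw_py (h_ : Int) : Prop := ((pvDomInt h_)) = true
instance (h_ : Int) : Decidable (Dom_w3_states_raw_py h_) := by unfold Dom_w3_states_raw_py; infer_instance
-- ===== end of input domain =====

-- B replaces A's naive recursive generator (which re-enumerates the same (remaining, cap)
-- suffix state once per prefix reaching it) by a top-down memoized DP that computes each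
-- state once and shares its suffix list; the output order is identical.

-- Python tuple comparison (m1, l1) > (m2, l2) for (str, int) pairs.
def pyTupGt (p q : String × Int) : Bool :=
  decide (q.1 < p.1) || (p.1 == q.1 && decide (q.2 < p.2))

-- ===== PORT A =====  (literal port of _gen; the generator's yield order is the foldl order.
-- `fuel` is only a termination guard: every recursive call decreases `remaining` by ≥ 2 while
-- fuel drops by 1, so with fuel = h.toNat the 0-fuel branch is never reached.)
def w3GenA (fuel : Nat) (remaining : Int) (maxPair : Option (String × Int)) : List (List (String × Int)) :=
  if remaining = 0 then [[]]
  else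
    match fuel with
    | 0 => []
    | Nat.succ f =>
      (PySem.List.pyRange (min remaining (match maxPair with | some mp => mp.2 | none => remaining)) 1 (-1)).flatMap
        (fun level =>
          (if level ≥ 3 then ["W", "L"] else if level ≥ 2 then ["L"] else ([] : List String)).flatMap
            (fun mtype =>
              if (match maxPair with | some mp => pyTupGt (mtype, level) mp | none => false) then []
              else (w3GenA f (remaining - level) (some (mtype, level))).map (fun rest => (mtype, level) :: rest)))

def w3_states_raw_py (h_ : Int) : List (List (String × Int)) := w3GenA h_.toNat h_ none

-- ===== PORT B =====  (literal port of Source B: top-down memoized solve; the mutated Python dict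
-- becomes a threaded PySem.Dict.  Same fuel guard as in A, never reached for fuel = h.toNat.)
def w3Solve (fuel : Nat) (r : Int) (cap : Option (String × Int))
    (memo : PySem.Dict (Int × Option (String × Int)) (List (List (String × Int)))) :
    List (List (String × Int)) × PySem.Dict (Int × Option (String × Int)) (List (List (String × Int))) :=
  match memo.get? (r, cap) with
  | some v => (v, memo)
  | none =>
    let res :=
      if r = 0 then (([[]] : List (List (String × Int))), memo)
      else
        match fuel with
        | 0 => ([], memo)
        | Nat.succ f =>
          (PySem.List.pyRange (match cap with | none => r | some mp => min r mp.2) 1 (-1)).foldl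
            (fun acc2 level =>
              (if level ≥ 3 then ["W", "L"] else ["L"]).foldl
                (fun acc mtype =>
                  if (match cap with | some mp => pyTupGt (mtype, level) mp | none => false) then acc
                  else
                    ((acc.1 ++ (w3Solve f (r - level) (some (mtype, level)) acc.2).1.map (fun rest => (mtype, level) :: rest),
                      (w3Solve f (r - level) (some (mtype, level)) acc.2).2)))
                acc2)
            (([] : List (List (String × Int))), memo)
    (res.1, res.2.insert (r, cap) res.1)

def w3_states_raw_py_alt (h_ : Int) : List (List (String × Int)) :=
  (w3Solve h_.toNat h_ none PySem.Dict.empty).1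

-- ===== PRECONDITION & SPEC =====
def Spec_w3_states_raw_py (h_ : Int) (out : List (List (String × Int))) : Prop := out = w3_states_raw_py_alt h_
instance (h_ : Int) (out : List (List (String × Int))) : Decidable (Spec_w3_states_raw_py h_ out) := by unfold Spec_w3_states_raw_py; infer_instance

-- ===== CLAIM (what is proved, stated in full; the proofs are below) =====
def Claim_equal_w3_states_raw_py : Prop := ∀ (h_ : Int), Dom_w3_states_raw_py h_ → Spec_w3_states_raw_py h_ (w3_states_raw_py h_)

-- ===== LEMMAS AND PROOFS =====

-- proof-side names for the guard and the loop bound of B (definitionally equal to the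
-- inline matches in the ports)
def capGuard (cap : Option (String × Int)) (l : Int) (mtype : String) : Bool :=
  match cap with | some mp => pyTupGt (mtype, l) mp | none => false

def capTopB (cap : Option (String × Int)) (r : Int) : Int :=
  match cap with | none => r | some mp => min r mp.2

-- the memo invariant: every cached value is the A-result for its key
def InvM (memo : PySem.Dict (Int × Option (String × Int)) (List (List (String × Int)))) : Prop :=
  ∀ p v, memo.get? p = some v → v = w3GenA p.1.toNat p.1 p.2

lemma invM_empty : InvM PySem.Dict.empty := by
  intro p v h
  simp [PySem.Dict.get?_empty] at h

lemma invM_insert {memo} (hI : InvM memo) (r : Int) (cap : Option (String × Int)) {v}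
    (hv : v = w3GenA r.toNat r cap) : InvM (memo.insert (r, cap) v) := by
  intro p w hw
  rw [PySem.Dict.get?_insert] at hw
  split at hw
  · rename_i hp; cases hw; subst hp; exact hv
  · exact hI p w hw

-- A returns [] on negative remaining (empty level range), whatever the fuel
lemma genA_neg (f : Nat) (r : Int) (cap : Option (String × Int)) (hr : r < 0) :
    w3GenA f r cap = [] := by
  rw [w3GenA.eq_def, if_neg (by omega : ¬ r = 0)]
  cases f with
  | zero => rfl
  | succ g =>
    cases cap with
    | none =>
      have hnil : PySem.List.pyRange r 1 (-1) = [] :=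
        PySem.List.pyRange_neg_one_eq_nil (by omega)
      simp [hnil]
    | some mp =>
      have hnil : PySem.List.pyRange (min r mp.2) 1 (-1) = [] :=
        PySem.List.pyRange_neg_one_eq_nil (le_trans (min_le_left _ _) (by omega))
      simp [hnil]

-- unfolding of A at positive fuel (match on the fuel reduced)
lemma genA_succ (f : Nat) (r : Int) (cap : Option (String × Int)) (h0 : ¬ r = 0) :
    w3GenA (f + 1) r cap =
      (PySem.List.pyRange (min r (match cap with | some mp => mp.2 | none => r)) 1 (-1)).flatMap
        (fun level =>
          (if level ≥ 3 then ["W", "L"] else if level ≥ 2 then ["L"] else ([] : List String)).flatMap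
            (fun mtype =>
              if (match cap with | some mp => pyTupGt (mtype, level) mp | none => false) then []
              else (w3GenA f (r - level) (some (mtype, level))).map (fun rest => (mtype, level) :: rest))) := by
  rw [w3GenA.eq_def, if_neg h0]

-- A's value does not depend on the fuel once the fuel covers the recursion depth
lemma genA_fuel : ∀ (f1 f2 : Nat) (r : Int) (cap : Option (String × Int)),
    r.toNat ≤ f1 → r.toNat ≤ f2 → w3GenA f1 r cap = w3GenA f2 r cap := by
  intro f1
  induction f1 with
  | zero =>
    intro f2 r cap h1 _
    by_cases h0 : r = 0
    · subst h0; rw [w3GenA.eq_def, w3GenA.eq_def]; simp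
    · have hr : r < 0 := by omega
      rw [genA_neg _ _ _ hr, genA_neg _ _ _ hr]
  | succ g ih =>
    intro f2 r cap h1 h2
    by_cases h0 : r = 0
    · subst h0; rw [w3GenA.eq_def, w3GenA.eq_def]; simp
    · rcases lt_trichotomy r 0 with hr | hr | hr
      · rw [genA_neg _ _ _ hr, genA_neg _ _ _ hr]
      · exact absurd hr h0
      · obtain ⟨g2, rfl⟩ : ∃ g2, f2 = g2 + 1 := ⟨f2 - 1, by omega⟩
        rw [genA_succ g r cap h0, genA_succ g2 r cap h0]
        apply List.flatMap_congr
        intro l hl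
        rw [PySem.List.mem_pyRange_neg_one] at hl
        have hlr : l ≤ r := le_trans hl.2 (min_le_left _ _)
        apply List.flatMap_congr
        intro mtype _
        rw [ih g2 (r - l) (some (mtype, l)) (by omega) (by omega)]

-- the inner fold (over mtype candidates) preserves the A/B correspondence
lemma innerB_sim (f : Nat) (r l : Int) (g : String → Bool)
    (hrec : ∀ (m : String) memo', InvM memo' →
      (w3Solve f (r - l) (some (m, l)) memo').1 = w3GenA (r - l).toNat (r - l) (some (m, l)) ∧
      InvM (w3Solve f (r - l) (some (m, l)) memo').2) :
    ∀ (ms : List String) (accA : List (List (String × Int)))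
      (accB : List (List (String × Int)) × PySem.Dict (Int × Option (String × Int)) (List (List (String × Int)))),
      accB.1 = accA → InvM accB.2 →
      (ms.foldl
        (fun acc mtype =>
          if g mtype then acc
          else
            ((acc.1 ++ (w3Solve f (r - l) (some (mtype, l)) acc.2).1.map (fun rest => (mtype, l) :: rest),
              (w3Solve f (r - l) (some (mtype, l)) acc.2).2)))
        accB).1 =
      accA ++ ms.flatMap
        (fun mtype =>
          if g mtype then []
          else (w3GenA (r - l).toNat (r - l) (some (mtype, l))).map (fun rest => (mtype, l) :: rest)) ∧
      InvM ((ms.foldl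
        (fun acc mtype =>
          if g mtype then acc
          else
            ((acc.1 ++ (w3Solve f (r - l) (some (mtype, l)) acc.2).1.map (fun rest => (mtype, l) :: rest),
              (w3Solve f (r - l) (some (mtype, l)) acc.2).2)))
        accB).2) := by
  intro ms
  induction ms with
  | nil => intro accA accB h1 h2; exact ⟨by simp [h1], h2⟩
  | cons m ms ih =>
    intro accA accB h1 h2
    simp only [List.foldl_cons, List.flatMap_cons]
    by_cases hg : g m = true
    · rw [if_pos hg, if_pos hg]
      obtain ⟨ha, hb⟩ := ih accA accB h1 h2
      exact ⟨by rw [List.nil_append]; exact ha, hb⟩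
    · rw [if_neg hg, if_neg hg]
      obtain ⟨hv, hI⟩ := hrec m accB.2 h2
      obtain ⟨ha, hb⟩ := ih
        (accA ++ (w3GenA (r - l).toNat (r - l) (some (m, l))).map (fun rest => (m, l) :: rest))
        ((accB.1 ++ (w3Solve f (r - l) (some (m, l)) accB.2).1.map (fun rest => (m, l) :: rest),
          (w3Solve f (r - l) (some (m, l)) accB.2).2))
        (by rw [hv, h1]) hI
      exact ⟨by rw [ha, List.append_assoc], hb⟩

-- the outer fold (over the level list) preserves the A/B correspondence
lemma foldB_sim (f : Nat) (r : Int) (hrn : r.toNat ≤ f + 1) (cap : Option (String × Int))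
    (IH : ∀ r' : Int, r'.toNat ≤ f → ∀ cap' memo', InvM memo' →
      (w3Solve f r' cap' memo').1 = w3GenA r'.toNat r' cap' ∧ InvM (w3Solve f r' cap' memo').2) :
    ∀ (levels : List Int), (∀ l ∈ levels, 2 ≤ l ∧ l ≤ r) →
    ∀ (accA : List (List (String × Int)))
      (accB : List (List (String × Int)) × PySem.Dict (Int × Option (String × Int)) (List (List (String × Int)))),
      accB.1 = accA → InvM accB.2 →
      (levels.foldl
        (fun acc2 l =>
          (if l ≥ 3 then ["W", "L"] else ["L"]).foldl
            (fun acc mtype =>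
              if capGuard cap l mtype then acc
              else
                ((acc.1 ++ (w3Solve f (r - l) (some (mtype, l)) acc.2).1.map (fun rest => (mtype, l) :: rest),
                  (w3Solve f (r - l) (some (mtype, l)) acc.2).2)))
            acc2)
        accB).1 =
      accA ++ levels.flatMap
        (fun l =>
          (if l ≥ 3 then ["W", "L"] else if l ≥ 2 then ["L"] else ([] : List String)).flatMap
            (fun mtype =>
              if capGuard cap l mtype then []
              else (w3GenA (r - l).toNat (r - l) (some (mtype, l))).map (fun rest => (mtype, l) :: rest))) ∧
      InvM ((levels.foldl
        (fun acc2 l =>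
          (if l ≥ 3 then ["W", "L"] else ["L"]).foldl
            (fun acc mtype =>
              if capGuard cap l mtype then acc
              else
                ((acc.1 ++ (w3Solve f (r - l) (some (mtype, l)) acc.2).1.map (fun rest => (mtype, l) :: rest),
                  (w3Solve f (r - l) (some (mtype, l)) acc.2).2)))
            acc2)
        accB).2) := by
  intro levels
  induction levels with
  | nil => intro _ accA accB h1 h2; exact ⟨by simp [h1], h2⟩
  | cons l ls ih =>
    intro hlev accA accB h1 h2
    have hl := hlev l (by simp)
    have hms : (if l ≥ 3 then ["W", "L"] else if l ≥ 2 then ["L"] else ([] : List String)) =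
        (if l ≥ 3 then ["W", "L"] else ["L"]) := by
      by_cases h3 : l ≥ 3
      · simp [h3]
      · simp [h3, show l ≥ 2 from hl.1]
    simp only [List.foldl_cons, List.flatMap_cons, hms]
    have hrec : ∀ (m : String) memo', InvM memo' →
        (w3Solve f (r - l) (some (m, l)) memo').1 = w3GenA (r - l).toNat (r - l) (some (m, l)) ∧
        InvM (w3Solve f (r - l) (some (m, l)) memo').2 := by
      intro m memo' hI
      exact IH (r - l) (by omega) (some (m, l)) memo' hI
    obtain ⟨hv, hI⟩ := innerB_sim f r l (capGuard cap l) hrec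
      (if l ≥ 3 then ["W", "L"] else ["L"]) accA accB h1 h2
    obtain ⟨ha, hb⟩ := ih (fun x hx => hlev x (by simp [hx])) _ _ hv hI
    exact ⟨by rw [ha, List.append_assoc], hb⟩

-- main simulation: with adequate fuel, B's solve returns A's value and keeps the memo sound
lemma solve_sim : ∀ (fuel : Nat) (r : Int), r.toNat ≤ fuel → ∀ (cap : Option (String × Int)) memo, InvM memo →
    (w3Solve fuel r cap memo).1 = w3GenA r.toNat r cap ∧ InvM (w3Solve fuel r cap memo).2 := by
  intro fuel
  induction fuel with
  | zero =>
    intro r hrn cap memo hInv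
    rw [w3Solve.eq_def]
    cases hc : PySem.Dict.get? memo (r, cap) with
    | some v =>
      exact ⟨hInv _ _ hc, hInv⟩
    | none =>
      by_cases h0 : r = 0
      · subst h0
        have hg : w3GenA (Int.toNat 0) 0 cap = [[]] := by rw [w3GenA.eq_def]; rfl
        exact ⟨hg.symm, invM_insert hInv 0 cap hg.symm⟩
      · have hr : r < 0 := by omega
        have hg : w3GenA r.toNat r cap = [] := genA_neg _ _ _ hr
        simp only [if_neg h0]
        exact ⟨hg.symm, invM_insert hInv r cap hg.symm⟩
  | succ f ih =>
    intro r hrn cap memo hInv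
    rw [w3Solve.eq_def]
    cases hc : PySem.Dict.get? memo (r, cap) with
    | some v =>
      exact ⟨hInv _ _ hc, hInv⟩
    | none =>
      by_cases h0 : r = 0
      · subst h0
        have hg : w3GenA (Int.toNat 0) 0 cap = [[]] := by rw [w3GenA.eq_def]; rfl
        exact ⟨hg.symm, invM_insert hInv 0 cap hg.symm⟩
      · -- A's value in the canonical foldl form shared with foldB_sim
        have hgen : w3GenA r.toNat r cap =
            (PySem.List.pyRange (capTopB cap r) 1 (-1)).flatMap
              (fun l =>
                (if l ≥ 3 then ["W", "L"] else if l ≥ 2 then ["L"] else ([] : List String)).flatMap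
                  (fun mtype =>
                    if capGuard cap l mtype then []
                    else (w3GenA (r - l).toNat (r - l) (some (mtype, l))).map (fun rest => (mtype, l) :: rest))) := by
          rcases lt_trichotomy r 0 with hr | hr | hr
          · rw [genA_neg _ _ _ hr,
              PySem.List.pyRange_neg_one_eq_nil
                (show capTopB cap r ≤ 1 by cases cap <;> simp [capTopB] <;> omega)]
            simp
          · exact absurd hr h0
          · obtain ⟨g, hg2⟩ : ∃ g, r.toNat = g + 1 := ⟨r.toNat - 1, by omega⟩
            rw [hg2, genA_succ g r cap h0]
            cases cap with
            | none =>
              simp only [capTopB, capGuard, min_self]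
              apply List.flatMap_congr
              intro l hl
              rw [PySem.List.mem_pyRange_neg_one] at hl
              apply List.flatMap_congr
              intro mtype _
              rw [genA_fuel g (r - l).toNat (r - l) (some (mtype, l)) (by omega) (by omega)]
              rfl
            | some mp =>
              simp only [capTopB, capGuard]
              apply List.flatMap_congr
              intro l hl
              rw [PySem.List.mem_pyRange_neg_one] at hl
              have hlr : l ≤ r := le_trans hl.2 (min_le_left _ _)
              apply List.flatMap_congr
              intro mtype _
              rw [genA_fuel g (r - l).toNat (r - l) (some (mtype, l)) (by omega) (by omega)]
              rfl
        have hlev : ∀ l ∈ PySem.List.pyRange (capTopB cap r) 1 (-1), 2 ≤ l ∧ l ≤ r := by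
          intro l hl
          rw [PySem.List.mem_pyRange_neg_one] at hl
          have : l ≤ r := le_trans hl.2 (by cases cap <;> simp [capTopB])
          omega
        obtain ⟨hv, hI⟩ := foldB_sim f r hrn cap ih
          (PySem.List.pyRange (capTopB cap r) 1 (-1)) hlev
          ([] : List (List (String × Int))) (([], memo)) rfl hInv
        simp only [if_neg h0]
        have hv2 := hv.trans (show _ = w3GenA r.toNat r cap by rw [List.nil_append]; exact hgen.symm)
        exact ⟨hv2, invM_insert hI r cap hv2⟩

-- ===== VERDICT (by name: the statement is the Claim_ definition above) =====
theorem w3_states_raw_py_spec : Claim_equal_w3_states_raw_py := by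
  intro h_ _
  unfold Spec_w3_states_raw_py w3_states_raw_py w3_states_raw_py_alt
  exact (solve_sim h_.toNat h_ le_rfl none PySem.Dict.empty invM_empty).1.symm
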